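-- pv_equiv track=rewrite | github.com/YeowKinRen/data_structure_and_algorithms | Data Structure & Algorithms/boyer_moore_algorithm.py | match_prefix
-- ===== SOURCE A (Python) =====
-- def match_prefix(m, zs):
--     """
--     Function that computes the match prefix values
--
--     Time complexity:    Best case O(N) where N is the length of zs
--                         Worst case O(N) where N is the length of zs
--     :param m: length of zs - 1
--     :param zs: z suffix, list of integers
--     :return: matched prefix, list of integers
--     """
--     mp = [0] * (m + 1)
--     for i in range(m - 1):
--         if zs[i] == i + 1:
--             mp[m - i - 1] = i + 1
--         else:
--             mp[m - i - 1] = mp[m - i]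
--     mp[0] = m
--     return mp
-- ===== SOURCE B (Python) =====
-- def match_prefix(m, zs):
--     """
--     Segment-filling alternative: first collect the matched prefix lengths
--     (the values i+1 with zs[i] == i+1), then write each constant run of the
--     answer ONCE with a slice assignment, walking the matches from largest to
--     smallest; no per-position carry, no neighbour copies.
--     """
--     matches = [i + 1 for i in range(m - 1) if zs[i] == i + 1]
--     mp = [0] * (m + 1)
--     left = 1
--     for v in reversed(matches):
--         mp[left:m - v + 1] = [v] * (m - v + 1 - left)
--         left = m - v + 1
--     mp[0] = m
--     return mp
-- ===== Notes on version B (the rewrite author's own statement) =====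
-- stated objective: alternative
-- what changed: Replaces A's per-position carry loop (each cell copied from its already-written neighbour) by a segment-filling algorithm: collect the matched prefix lengths first, then write each constant run of the answer once with a slice assignment, walking matches from largest to smallest.
import Mathlib
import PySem

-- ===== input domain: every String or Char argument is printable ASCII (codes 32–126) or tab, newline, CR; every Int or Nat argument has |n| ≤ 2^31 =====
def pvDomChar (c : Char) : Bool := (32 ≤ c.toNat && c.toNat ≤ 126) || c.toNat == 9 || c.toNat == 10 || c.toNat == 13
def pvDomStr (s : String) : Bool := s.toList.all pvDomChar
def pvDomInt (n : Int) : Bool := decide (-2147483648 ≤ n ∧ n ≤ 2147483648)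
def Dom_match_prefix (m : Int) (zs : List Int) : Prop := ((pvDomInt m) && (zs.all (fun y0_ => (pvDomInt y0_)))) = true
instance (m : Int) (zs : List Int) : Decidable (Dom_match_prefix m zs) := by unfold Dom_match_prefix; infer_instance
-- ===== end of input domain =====

-- B replaces A's per-position carry loop by segment filling: it collects the matched
-- prefix lengths and writes each constant run of the answer once via a slice assignment.

-- ===== PORT A =====
def match_prefix (m : Int) (zs : List Int) : List Int :=
  let mp : List Int := List.replicate (m + 1).toNat 0
  let mp := (PySem.List.pyRange 0 (m - 1) 1).foldl (fun mp i =>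
    if PySem.List.pyGetD zs i 0 = i + 1 then
      PySem.List.pySetD mp (m - i - 1) (i + 1)
    else
      PySem.List.pySetD mp (m - i - 1) (PySem.List.pyGetD mp (m - i) 0)) mp
  PySem.List.pySetD mp 0 m

-- ===== PORT B =====
def match_prefix_alt (m : Int) (zs : List Int) : List Int :=
  let ms := ((PySem.List.pyRange 0 (m - 1) 1).filter
      (fun i => PySem.List.pyGetD zs i 0 == i + 1)).map (fun i => i + 1)
  let st := ms.reverse.foldl (fun (st : Int × List Int) v =>
    -- slice assignment mp[left : m-v+1] = [v]*(m-v+1-left): exact as take/replicate/drop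
    -- here, since 0 ≤ left ≤ m-v+1 ≤ len(mp) and the replacement has the slice's length
    (m - v + 1,
     st.2.take st.1.toNat ++ List.replicate (m - v + 1 - st.1).toNat v
       ++ st.2.drop (m - v + 1).toNat)) ((1 : Int), List.replicate (m + 1).toNat 0)
  PySem.List.pySetD st.2 0 m

-- ===== PRECONDITION & SPEC =====
-- Pre_ excludes exactly the inputs where Python A raises IndexError: negative m
-- ([0]*(m+1) is empty so mp[0] = m fails) and zs shorter than m-1 (zs[i] in the loop).
def Pre_match_prefix (m : Int) (zs : List Int) : Prop := 0 ≤ m ∧ m - 1 ≤ (zs.length : Int)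
instance (m : Int) (zs : List Int) : Decidable (Pre_match_prefix m zs) := by unfold Pre_match_prefix; infer_instance

def pvWitness_match_prefix : Int × List Int := (3, [1, 0, 2, 0])

def Spec_match_prefix (m : Int) (zs : List Int) (out : List Int) : Prop := out = match_prefix_alt m zs
instance (m : Int) (zs : List Int) (out : List Int) : Decidable (Spec_match_prefix m zs out) := by unfold Spec_match_prefix; infer_instance

-- ===== CLAIM (what is proved, stated in full; the proofs are below) =====
def Claim_equal_match_prefix : Prop := ∀ (m : Int) (zs : List Int), Dom_match_prefix m zs → Pre_match_prefix m zs → Spec_match_prefix m zs (match_prefix m zs)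

-- ===== LEMMAS AND PROOFS =====

-- 'pvBest zs n' = the value A's carry holds after processing i = 0 .. n-1
def pvBest (zs : List Int) : Nat → Int
  | 0 => 0
  | n + 1 => if PySem.List.pyGetD zs (n : Int) 0 = (n : Int) + 1 then (n : Int) + 1 else pvBest zs n

-- A's loop body, named for the proofs
def pvStepA (m : Int) (zs : List Int) (mp : List Int) (i : Int) : List Int :=
  if PySem.List.pyGetD zs i 0 = i + 1 then
    PySem.List.pySetD mp (m - i - 1) (i + 1)
  else
    PySem.List.pySetD mp (m - i - 1) (PySem.List.pyGetD mp (m - i) 0)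

-- B's loop body, named for the proofs
def pvStepB (m : Int) (st : Int × List Int) (v : Int) : Int × List Int :=
  (m - v + 1,
   st.2.take st.1.toNat ++ List.replicate (m - v + 1 - st.1).toNat v
     ++ st.2.drop (m - v + 1).toNat)

-- ascending matched prefix lengths among the first n loop indices
def pvMatches (zs : List Int) (n : Nat) : List Int :=
  ((List.range n).filter
    (fun (j : Nat) => PySem.List.pyGetD zs (j : Int) 0 == (j : Int) + 1)).map
    (fun (j : Nat) => (j : Int) + 1)

-- threshold-order expansion of a DESCENDING match list over thresholds 1..t
def pvT (t : Int) : List Int → List Int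
  | [] => List.replicate t.toNat 0
  | v :: L => pvT (v - 1) L ++ List.replicate (t - v + 1).toNat v

-- largest element of a DESCENDING list that is ≤ s (0 if none)
def pvMaxLE (s : Int) : List Int → Int
  | [] => 0
  | v :: L => if v ≤ s then v else pvMaxLE s L

lemma match_prefix_eq (m : Int) (zs : List Int) :
    match_prefix m zs =
      PySem.List.pySetD
        ((PySem.List.pyRange 0 (m - 1) 1).foldl (pvStepA m zs)
          (List.replicate (m + 1).toNat 0)) 0 m := rfl

lemma match_prefix_alt_eq (m : Int) (zs : List Int) :
    match_prefix_alt m zs =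
      PySem.List.pySetD
        ((((PySem.List.pyRange 0 (m - 1) 1).filter
            (fun i => PySem.List.pyGetD zs i 0 == i + 1)).map (fun i => i + 1)).reverse.foldl
          (pvStepB m) ((1 : Int), List.replicate (m + 1).toNat 0)).2 0 m := rfl

lemma pvT_length (L : List Int) (t : Int) (h0 : 0 ≤ t)
    (hp : L.Pairwise (fun a b => b < a)) (hmem : ∀ x ∈ L, 1 ≤ x ∧ x ≤ t) :
    (pvT t L).length = t.toNat := by
  induction L generalizing t with
  | nil => simp [pvT]
  | cons v L ih =>
    have hv := hmem v (by simp)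
    rw [List.pairwise_cons] at hp
    have hL : ∀ x ∈ L, 1 ≤ x ∧ x ≤ v - 1 := by
      intro x hx
      exact ⟨(hmem x (by simp [hx])).1, by have := hp.1 x hx; omega⟩
    simp only [pvT, List.length_append, List.length_replicate,
      ih (v - 1) (by omega) hp.2 hL]
    omega

lemma pvMaxLE_append_gt (s : Int) (X Y : List Int) (h : ∀ x ∈ X, s < x) :
    pvMaxLE s (X ++ Y) = pvMaxLE s Y := by
  induction X with
  | nil => rfl
  | cons a X ih =>
    have ha := h a (by simp)
    simp only [List.cons_append, pvMaxLE, if_neg (by omega : ¬ a ≤ s)]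
    exact ih (fun x hx => h x (by simp [hx]))

lemma pvMaxLE_congr (s s' : Int) (L : List Int) (h : ∀ v ∈ L, (v ≤ s) ↔ (v ≤ s')) :
    pvMaxLE s L = pvMaxLE s' L := by
  induction L with
  | nil => rfl
  | cons a L ih =>
    have ha := h a (by simp)
    by_cases hc : a ≤ s
    · simp only [pvMaxLE, if_pos hc, if_pos (ha.mp hc)]
    · simp only [pvMaxLE, if_neg hc, if_neg (fun hc' => hc (ha.mpr hc'))]
      exact ih (fun v hv => h v (by simp [hv]))

lemma pvT_getElem (L : List Int) (t : Int) (j : Nat) (h0 : 0 ≤ t)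
    (hp : L.Pairwise (fun a b => b < a)) (hmem : ∀ x ∈ L, 1 ≤ x ∧ x ≤ t)
    (hj : j < (pvT t L).length) :
    (pvT t L)[j] = pvMaxLE ((j : Int) + 1) L := by
  induction L generalizing t with
  | nil => simp [pvT, pvMaxLE] at hj ⊢
  | cons v L ih =>
    have hv := hmem v (by simp)
    rw [List.pairwise_cons] at hp
    have hL : ∀ x ∈ L, 1 ≤ x ∧ x ≤ v - 1 := by
      intro x hx
      exact ⟨(hmem x (by simp [hx])).1, by have := hp.1 x hx; omega⟩
    have hlen : (pvT (v - 1) L).length = (v - 1).toNat :=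
      pvT_length L (v - 1) (by omega) hp.2 hL
    simp only [pvT] at hj ⊢
    by_cases hcase : j < (pvT (v - 1) L).length
    · rw [List.getElem_append_left hcase, ih (v - 1) (by omega) hp.2 hL hcase]
      have hjv : ¬ v ≤ (j : Int) + 1 := by
        rw [hlen] at hcase; omega
      simp only [pvMaxLE, if_neg hjv]
    · rw [List.getElem_append_right (by omega)]
      rw [List.getElem_replicate]
      have hjv : v ≤ (j : Int) + 1 := by
        rw [hlen] at hcase; omega
      simp only [pvMaxLE, if_pos hjv]

lemma pvMatches_succ (zs : List Int) (n : Nat) :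
    pvMatches zs (n + 1) = pvMatches zs n ++
      (if PySem.List.pyGetD zs (n : Int) 0 = (n : Int) + 1 then [(n : Int) + 1] else []) := by
  unfold pvMatches
  rw [List.range_succ, List.filter_append, List.map_append]
  congr 1
  by_cases h : PySem.List.pyGetD zs (n : Int) 0 = (n : Int) + 1 <;>
    simp only [PySem.List.pyGetD_natCast, List.getD_eq_getElem?_getD] at h ⊢ <;> simp [h]

lemma pvMatches_mem (zs : List Int) (n : Nat) :
    ∀ x ∈ pvMatches zs n, 1 ≤ x ∧ x ≤ (n : Int) := by
  intro x hx
  unfold pvMatches at hx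
  simp only [List.mem_map, List.mem_filter, List.mem_range] at hx
  obtain ⟨j, ⟨hj, _⟩, rfl⟩ := hx
  omega

lemma pvMatches_pairwise (zs : List Int) (n : Nat) :
    (pvMatches zs n).Pairwise (· < ·) := by
  unfold pvMatches
  have h1 := (List.pairwise_lt_range (n := n)).filter
    (fun (j : Nat) => PySem.List.pyGetD zs (j : Int) 0 == (j : Int) + 1)
  exact List.Pairwise.map _ (fun a b h => by push_cast; omega) h1

lemma pvBest_eq_maxLE (zs : List Int) (n : Nat) :
    pvBest zs n = pvMaxLE (n : Int) (pvMatches zs n).reverse := by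
  induction n with
  | zero => rfl
  | succ n ih =>
    rw [pvMatches_succ, List.reverse_append]
    by_cases h : PySem.List.pyGetD zs (n : Int) 0 = (n : Int) + 1
    · simp only [pvBest, if_pos h, pvMaxLE, List.reverse_cons,
        List.reverse_nil, List.nil_append, List.cons_append]
      rw [if_pos (by push_cast; omega)]
    · simp only [pvBest, if_neg h, List.reverse_nil, List.nil_append]
      rw [ih]
      refine (pvMaxLE_congr _ _ _ ?_).symm
      intro v hv
      have := pvMatches_mem zs n v (List.mem_reverse.mp hv)
      push_cast
      omega

lemma pvMaxLE_matches_mono (zs : List Int) (s : Int) (a b : Nat)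
    (hab : a ≤ b) (hs : s ≤ (a : Int)) :
    pvMaxLE s (pvMatches zs b).reverse = pvMaxLE s (pvMatches zs a).reverse := by
  induction b with
  | zero =>
    have : a = 0 := by omega
    subst this; rfl
  | succ b ih =>
    by_cases hcase : a = b + 1
    · subst hcase; rfl
    · have hab' : a ≤ b := by omega
      rw [pvMatches_succ, List.reverse_append]
      rw [← ih hab']
      by_cases h : PySem.List.pyGetD zs (b : Int) 0 = (b : Int) + 1
      · rw [if_pos h]
        refine pvMaxLE_append_gt s _ _ ?_
        intro x hx
        simp at hx
        omega
      · rw [if_neg h]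
        simp

lemma pvBest_eq_maxLE_full (zs : List Int) (N j : Nat) (h : j + 1 ≤ N) :
    pvBest zs (j + 1) = pvMaxLE ((j : Int) + 1) (pvMatches zs N).reverse := by
  rw [pvBest_eq_maxLE]
  have := pvMaxLE_matches_mono zs ((j : Int) + 1) (j + 1) N h (by push_cast; omega)
  rw [this]
  push_cast
  rfl

-- ===== A-side invariant =====
lemma pv_invA (m : Int) (zs : List Int) (hm : 1 ≤ m)
    (n : Nat) (hn : (n : Int) ≤ m - 1) :
    (PySem.List.pyRange 0 (n : Int) 1).foldl (pvStepA m zs) (List.replicate (m + 1).toNat 0)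
      = List.replicate (m - n).toNat 0
        ++ (((List.range n).map (fun j => pvBest zs (j + 1))).reverse ++ [0])
    ∧ ((((List.range n).map (fun j => pvBest zs (j + 1))).reverse ++ [0]).head? =
        some (pvBest zs n)) := by
  induction n with
  | zero =>
    rw [PySem.List.pyRange_one_eq_nil (by omega)]
    simp only [List.foldl_nil, List.range_zero, List.map_nil, List.reverse_nil,
      List.nil_append, List.head?_cons]
    constructor
    · have h1 : (m + 1).toNat = m.toNat + 1 := by omega
      have h2 : (m - (0 : Nat)).toNat = m.toNat := by omega
      rw [h1, h2, List.replicate_succ']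
    · rfl
  | succ n ih =>
    have hn' : (n : Int) ≤ m - 1 := by push_cast at hn ⊢; omega
    obtain ⟨ihA, ihB⟩ := ih hn'
    have hsplit : PySem.List.pyRange 0 ((n : Nat) + 1 : Nat) 1
        = PySem.List.pyRange 0 (n : Int) 1 ++ [(n : Int)] := by
      have := PySem.List.pyRange_one_succ_right (a := 0) (b := (n : Int)) (by positivity)
      push_cast
      exact this
    have hmap : (List.range (n + 1)).map (fun j => pvBest zs (j + 1))
        = (List.range n).map (fun j => pvBest zs (j + 1)) ++ [pvBest zs (n + 1)] := by
      rw [List.range_succ, List.map_append]; rfl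
    have hread : PySem.List.pyGetD
        (List.replicate (m - n).toNat 0
          ++ (((List.range n).map (fun j => pvBest zs (j + 1))).reverse ++ [0]))
        (m - (n : Int)) 0 = pvBest zs n := by
      have h0 : (0 : Int) ≤ m - n := by omega
      rw [PySem.List.pyGetD_of_nonneg _ _ h0]
      rw [List.getD_eq_getElem?_getD, List.getElem?_append_right (by simp)]
      simp only [List.length_replicate]
      rw [Nat.sub_self]
      cases hh : (((List.range n).map (fun j => pvBest zs (j + 1))).reverse ++ [(0 : Int)]) with
      | nil => simp at hh
      | cons a tl =>
        have h3 := ihB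
        rw [hh] at h3
        have ha : a = pvBest zs n := by simpa using h3
        simp [ha]
    have hset : ∀ w : Int,
        PySem.List.pySetD (List.replicate (m - n).toNat 0
          ++ (((List.range n).map (fun j => pvBest zs (j + 1))).reverse ++ [0]))
          (m - (n : Int) - 1) w
        = List.replicate (m - ((n : Nat) + 1 : Nat)).toNat 0
          ++ ((w :: ((List.range n).map (fun j => pvBest zs (j + 1))).reverse) ++ [0]) := by
      intro w
      rw [PySem.List.pySetD_of_nonneg _ _ (by omega)]
      have hk : (m - n).toNat = (m - ((n : Nat) + 1 : Nat)).toNat + 1 := by push_cast; omega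
      have hidx : (m - (n : Int) - 1).toNat = (m - ((n : Nat) + 1 : Nat)).toNat := by
        push_cast; omega
      rw [hk, List.replicate_succ', hidx, List.append_assoc, List.set_append]
      simp only [List.length_replicate]
      rw [if_neg (by omega), Nat.sub_self]
      simp
    have hstepA : pvStepA m zs
        (List.replicate (m - n).toNat 0
          ++ (((List.range n).map (fun j => pvBest zs (j + 1))).reverse ++ [0])) (n : Int)
        = List.replicate (m - ((n : Nat) + 1 : Nat)).toNat 0
          ++ ((pvBest zs (n + 1) :: ((List.range n).map (fun j => pvBest zs (j + 1))).reverse)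
            ++ [0]) := by
      unfold pvStepA
      split_ifs with h
      · rw [hset]
        have hb : pvBest zs (n + 1) = (n : Int) + 1 := by
          simp only [pvBest]; rw [if_pos h]
        rw [hb]
      · rw [hread, hset]
        have hb : pvBest zs (n + 1) = pvBest zs n := by
          simp only [pvBest]; rw [if_neg h]
        rw [hb]
    constructor
    · rw [hsplit, List.foldl_append, ihA]
      simp only [List.foldl_cons, List.foldl_nil]
      rw [hstepA, hmap]
      simp
    · rw [hmap]
      simp

-- ===== B-side invariant: the segment-filling fold =====
lemma pv_invB (m : Int) :
    ∀ (L : List Int) (t : Int) (P : List Int),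
      L.Pairwise (fun a b => b < a) → (∀ x ∈ L, 1 ≤ x ∧ x ≤ t) →
      0 ≤ t → t ≤ m - 1 → P.length = (m - 1 - t).toNat →
      (L.foldl (pvStepB m) (m - t, 0 :: (P ++ List.replicate t.toNat 0) ++ [0])).2
        = 0 :: (P ++ (pvT t L).reverse) ++ [0] := by
  intro L
  induction L with
  | nil =>
    intro t P _ _ _ _ _
    simp [pvT]
  | cons v L ih =>
    intro t P hp hmem h0 htm hP
    have hv := hmem v (by simp)
    rw [List.pairwise_cons] at hp
    have hL : ∀ x ∈ L, 1 ≤ x ∧ x ≤ v - 1 := by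
      intro x hx
      exact ⟨(hmem x (by simp [hx])).1, by have := hp.1 x hx; omega⟩
    rw [List.foldl_cons]
    have hstep : pvStepB m (m - t, 0 :: (P ++ List.replicate t.toNat 0) ++ [0]) v
        = (m - (v - 1),
           0 :: ((P ++ List.replicate (t - v + 1).toNat v)
             ++ List.replicate (v - 1).toNat 0) ++ [0]) := by
      unfold pvStepB
      refine Prod.ext (by simp only; omega) ?_
      simp only
      have htake : ((0 : Int) :: (P ++ List.replicate t.toNat 0) ++ [0]).take (m - t).toNat
          = 0 :: P := by
        have h1 : ((0 : Int) :: (P ++ List.replicate t.toNat 0) ++ [0])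
            = (0 :: P) ++ (List.replicate t.toNat 0 ++ [0]) := by simp
        rw [h1, List.take_append_of_le_length (by simp; omega)]
        rw [List.take_of_length_le (by simp; omega)]
      have hdrop : ((0 : Int) :: (P ++ List.replicate t.toNat 0) ++ [0]).drop (m - v + 1).toNat
          = List.replicate (v - 1).toNat 0 ++ [0] := by
        have h1 : ((0 : Int) :: (P ++ List.replicate t.toNat 0) ++ [0])
            = ((0 :: P) ++ List.replicate (t - v + 1).toNat 0)
              ++ (List.replicate (v - 1).toNat 0 ++ [0]) := by
          have hsum : t.toNat = (t - v + 1).toNat + (v - 1).toNat := by omega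
          rw [hsum, List.replicate_add]
          simp only [List.cons_append, List.append_assoc]
        rw [h1, List.drop_append_of_le_length (by simp; omega)]
        rw [List.drop_of_length_le (by simp; omega)]
        simp
      rw [htake, hdrop]
      have hcnt : (m - v + 1 - (m - t)).toNat = (t - v + 1).toNat := by omega
      rw [hcnt]
      simp
    rw [hstep]
    have hmv : m - (v - 1) = m - (v - 1) := rfl
    have := ih (v - 1) (P ++ List.replicate (t - v + 1).toNat v) hp.2 hL
      (by omega) (by omega) (by simp; omega)
    rw [List.append_assoc] at this ⊢
    rw [this]
    simp only [pvT, List.reverse_append, List.reverse_replicate]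
    simp

-- ===== main equality =====
lemma pv_main (m : Int) (zs : List Int) (hpre : Pre_match_prefix m zs) :
    match_prefix m zs = match_prefix_alt m zs := by
  obtain ⟨hm, hlen⟩ := hpre
  rcases eq_or_lt_of_le hm with h0 | h1
  · -- m = 0
    have : m = 0 := h0.symm
    subst this
    rfl
  · -- 1 ≤ m
    have hm1 : (1 : Int) ≤ m := h1
    set n : Nat := (m - 1).toNat with hn
    have hnI : ((n : Nat) : Int) = m - 1 := by omega
    -- A's side
    obtain ⟨hA, _⟩ := pv_invA m zs hm1 n (by omega)
    rw [hnI] at hA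
    -- B's side: bridge the port's match list to pvMatches
    have hbridge : (((PySem.List.pyRange 0 (m - 1) 1).filter
        (fun i => PySem.List.pyGetD zs i 0 == i + 1)).map (fun i => i + 1))
        = pvMatches zs n := by
      rw [PySem.List.pyRange_one, List.filter_map, List.map_map]
      have hmn : (m - 1 - 0).toNat = n := by omega
      rw [hmn]
      simp [Function.comp_def, pvMatches, List.getD_eq_getElem?_getD]
    have hdesc : (pvMatches zs n).reverse.Pairwise (fun a b => b < a) := by
      rw [List.pairwise_reverse]
      exact pvMatches_pairwise zs n
    have hmemr : ∀ x ∈ (pvMatches zs n).reverse, 1 ≤ x ∧ x ≤ m - 1 := by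
      intro x hx
      have := pvMatches_mem zs n x (List.mem_reverse.mp hx)
      omega
    have hinit : List.replicate (m + 1).toNat (0 : Int)
        = 0 :: (([] : List Int) ++ List.replicate (m - 1).toNat 0) ++ [0] := by
      have h2 : (m + 1).toNat = ((m - 1).toNat + 1) + 1 := by omega
      rw [h2, List.replicate_succ, List.replicate_succ']
      simp
    have hone : (1 : Int) = m - (m - 1) := by omega
    have hB := pv_invB m (pvMatches zs n).reverse (m - 1) [] hdesc hmemr
      (by omega) (by omega) (by simp)
    -- the two bodies coincide
    have hbody : (List.range n).map (fun j => pvBest zs (j + 1))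
        = pvT (m - 1) (pvMatches zs n).reverse := by
      refine List.ext_getElem ?_ ?_
      · rw [pvT_length _ _ (by omega) hdesc hmemr, List.length_map, List.length_range]
      · intro j hj1 hj2
        rw [pvT_getElem _ _ _ (by omega) hdesc hmemr hj2]
        simp only [List.getElem_map, List.getElem_range]
        exact pvBest_eq_maxLE_full zs n j
          (by simp only [List.length_map, List.length_range] at hj1; omega)
    -- assemble
    rw [← hone, ← hinit] at hB
    rw [match_prefix_eq, match_prefix_alt_eq, hbridge, hA, hB]
    have hrepl1' : (m - (m - 1)).toNat = 1 := by omega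
    rw [hrepl1', ← hbody]
    simp

-- ===== VERDICT (by name: the statement is the Claim_ definition above) =====
theorem match_prefix_spec : Claim_equal_match_prefix := by
  intro m zs _ hpre
  unfold Spec_match_prefix
  exact pv_main m zs hpre
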